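-- pv_equiv track=rewrite | github.com/JanJamonline/ai-trading-system | analysis/per_symbol/signal_accuracy.py | compute
-- ===== SOURCE A (Python) =====
-- def compute(signals):
--     stats = {
--         "BUY": {"correct": 0, "total": 0},
--         "SELL": {"correct": 0, "total": 0},
--         "HOLD": {"correct": 0, "total": 0},
--     }
--
--     for s in signals:
--         sig = s["signal"]
--         if sig not in stats:
--             continue
--
--         stats[sig]["total"] += 1
--         if s.get("outcome") == "CORRECT":
--             stats[sig]["correct"] += 1
--
--     return stats
-- ===== SOURCE B (Python) =====
-- def compute(signals):
--     return {
--         t: {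
--             "correct": sum(
--                 1
--                 for s in signals
--                 if s["signal"] == t and s.get("outcome") == "CORRECT"
--             ),
--             "total": sum(1 for s in signals if s["signal"] == t),
--         }
--         for t in ("BUY", "SELL", "HOLD")
--     }
-- ===== Notes on version B (the rewrite author's own statement) =====
-- stated objective: idiomatic
-- what changed: Replaces the single branching pass that mutates a pre-built nested dict with a dict comprehension over the three fixed signal types, computing each count by a separate scan of the signals.
import Mathlib
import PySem

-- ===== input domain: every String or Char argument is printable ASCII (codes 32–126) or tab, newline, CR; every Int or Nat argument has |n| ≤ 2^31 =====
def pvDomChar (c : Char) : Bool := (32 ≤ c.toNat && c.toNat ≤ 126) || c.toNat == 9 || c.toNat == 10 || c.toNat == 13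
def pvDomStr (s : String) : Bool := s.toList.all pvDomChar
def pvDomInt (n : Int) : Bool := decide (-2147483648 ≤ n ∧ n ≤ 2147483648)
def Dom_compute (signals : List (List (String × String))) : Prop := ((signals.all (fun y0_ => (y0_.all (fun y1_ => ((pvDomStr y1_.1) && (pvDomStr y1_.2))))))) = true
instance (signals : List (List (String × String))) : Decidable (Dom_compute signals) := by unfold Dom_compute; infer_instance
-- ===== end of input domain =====

-- B replaces A's single branching pass over a mutated nested dict with a comprehension over the
-- three fixed signal types, each count computed by its own scan; same cost class, more idiomatic.

-- ===== PORT A =====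
-- one loop iteration of A; s["signal"] raising KeyError (get? = none) is excluded by Pre_compute,
-- the state is then returned unchanged
def computeStep (stats : PySem.Dict String (PySem.Dict String Int))
    (s : List (String × String)) : PySem.Dict String (PySem.Dict String Int) :=
  match (PySem.Dict.mk s).get? "signal" with
  | none => stats
  | some sig =>
    if stats.contains sig then
      let stats1 := stats.modify sig PySem.Dict.empty (fun d => d.modify "total" 0 (· + 1))
      if (PySem.Dict.mk s).get? "outcome" = some "CORRECT" then
        stats1.modify sig PySem.Dict.empty (fun d => d.modify "correct" 0 (· + 1))
      else stats1
    else stats   -- 'continue'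

def compute (signals : List (List (String × String))) : List (String × List (String × Int)) :=
  let stats0 : PySem.Dict String (PySem.Dict String Int) :=
    PySem.Dict.mk [("BUY", PySem.Dict.mk [("correct", 0), ("total", 0)]),
                   ("SELL", PySem.Dict.mk [("correct", 0), ("total", 0)]),
                   ("HOLD", PySem.Dict.mk [("correct", 0), ("total", 0)])]
  ((signals.foldl computeStep stats0).items.map (fun p => (p.1, p.2.items)))

-- ===== PORT B =====
def compute_alt (signals : List (List (String × String))) : List (String × List (String × Int)) :=
  (["BUY", "SELL", "HOLD"]).map (fun t =>
    (t, [("correct",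
          ((signals.countP (fun s =>
              ((PySem.Dict.mk s).get? "signal" == some t) &&
              ((PySem.Dict.mk s).get? "outcome" == some "CORRECT")) : Nat) : Int)),
         ("total",
          ((signals.countP (fun s => (PySem.Dict.mk s).get? "signal" == some t) : Nat) : Int))]))

-- ===== PRECONDITION & SPEC =====
-- Pre_ excludes exactly the signals missing a "signal" key, on which both Pythons raise KeyError
def Pre_compute (signals : List (List (String × String))) : Prop :=
  ∀ s ∈ signals, (PySem.Dict.mk s).contains "signal" = true
instance (signals : List (List (String × String))) : Decidable (Pre_compute signals) := by
  unfold Pre_compute; infer_instance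
def pvWitness_compute : (List (List (String × String))) :=
  [[("signal", "BUY"), ("outcome", "CORRECT")], [("signal", "SELL")], [("signal", "XX")]]
def Spec_compute (signals : List (List (String × String))) (out : List (String × List (String × Int))) : Prop := out = compute_alt signals
instance (signals : List (List (String × String))) (out : List (String × List (String × Int))) : Decidable (Spec_compute signals out) := by unfold Spec_compute; infer_instance

-- ===== CLAIM (what is proved, stated in full; the proofs are below) =====
def Claim_equal_compute : Prop := ∀ (signals : List (List (String × String))), Dom_compute signals → Pre_compute signals → Spec_compute signals (compute signals)

-- ===== LEMMAS AND PROOFS =====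

-- the canonical shape of A's stats state, parameterised by the six counters
def pvSt (cB tB cS tS cH tH : Int) : PySem.Dict String (PySem.Dict String Int) :=
  PySem.Dict.mk [("BUY", PySem.Dict.mk [("correct", cB), ("total", tB)]),
                 ("SELL", PySem.Dict.mk [("correct", cS), ("total", tS)]),
                 ("HOLD", PySem.Dict.mk [("correct", cH), ("total", tH)])]

def pvCorrP (t : String) (s : List (String × String)) : Bool :=
  ((PySem.Dict.mk s).get? "signal" == some t) &&
  ((PySem.Dict.mk s).get? "outcome" == some "CORRECT")

def pvTotP (t : String) (s : List (String × String)) : Bool :=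
  (PySem.Dict.mk s).get? "signal" == some t

lemma pvStep_st (cB tB cS tS cH tH : Int) (s : List (String × String)) :
    computeStep (pvSt cB tB cS tS cH tH) s =
      pvSt (cB + if pvCorrP "BUY" s then 1 else 0) (tB + if pvTotP "BUY" s then 1 else 0)
           (cS + if pvCorrP "SELL" s then 1 else 0) (tS + if pvTotP "SELL" s then 1 else 0)
           (cH + if pvCorrP "HOLD" s then 1 else 0) (tH + if pvTotP "HOLD" s then 1 else 0) := by
  rcases hsig : (PySem.Dict.mk s).get? "signal" with _ | sig
  · simp [computeStep, hsig, pvCorrP, pvTotP]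
  · by_cases hb : sig = "BUY"
    · subst hb
      by_cases hout : (PySem.Dict.mk s).get? "outcome" = some "CORRECT" <;>
        simp [computeStep, hsig, hout, pvCorrP, pvTotP, pvSt, PySem.Dict.modify,
          PySem.Dict.getD, PySem.Dict.get?_mk_cons, PySem.Dict.contains_mk,
          PySem.Dict.insert, PySem.Dict.empty]
    · by_cases hs : sig = "SELL"
      · subst hs
        by_cases hout : (PySem.Dict.mk s).get? "outcome" = some "CORRECT" <;>
          simp [computeStep, hsig, hout, pvCorrP, pvTotP, pvSt, PySem.Dict.modify,
            PySem.Dict.getD, PySem.Dict.get?_mk_cons, PySem.Dict.contains_mk,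
            PySem.Dict.insert, PySem.Dict.empty]
      · by_cases hh : sig = "HOLD"
        · subst hh
          by_cases hout : (PySem.Dict.mk s).get? "outcome" = some "CORRECT" <;>
            simp [computeStep, hsig, hout, pvCorrP, pvTotP, pvSt, PySem.Dict.modify,
              PySem.Dict.getD, PySem.Dict.get?_mk_cons, PySem.Dict.contains_mk,
              PySem.Dict.insert, PySem.Dict.empty]
        · simp [computeStep, hsig, hb, hs, hh, pvCorrP, pvTotP, pvSt, PySem.Dict.contains_mk,
            beq_iff_eq]
          rintro (rfl | rfl | rfl)
          exacts [absurd rfl hb, absurd rfl hs, absurd rfl hh]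

lemma pvFoldl_st (l : List (List (String × String))) (cB tB cS tS cH tH : Int) :
    l.foldl computeStep (pvSt cB tB cS tS cH tH) =
      pvSt (cB + l.countP (pvCorrP "BUY")) (tB + l.countP (pvTotP "BUY"))
           (cS + l.countP (pvCorrP "SELL")) (tS + l.countP (pvTotP "SELL"))
           (cH + l.countP (pvCorrP "HOLD")) (tH + l.countP (pvTotP "HOLD")) := by
  induction l generalizing cB tB cS tS cH tH with
  | nil => simp [pvSt]
  | cons s l ih =>
    rw [List.foldl_cons, pvStep_st, ih]
    simp only [pvSt, List.countP_cons, PySem.Dict.mk.injEq, List.cons.injEq, Prod.mk.injEq,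
      and_true, true_and]
    split_ifs <;> (push_cast; omega)

-- ===== VERDICT (by name: the statement is the Claim_ definition above) =====
theorem compute_spec : Claim_equal_compute := by
  intro signals _ _
  show compute signals = compute_alt signals
  calc compute signals
      = ((signals.foldl computeStep (pvSt 0 0 0 0 0 0)).items.map (fun p => (p.1, p.2.items))) := rfl
    _ = compute_alt signals := by
        rw [pvFoldl_st]
        simp only [pvSt, compute_alt, List.map_cons, List.map_nil, zero_add]
        rfl
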